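-- pv_equiv track=rewrite | github.com/tysmitht/tysmitht.github.io | source/SortingAnim.py | quick_ops
-- ===== SOURCE A (Python) =====
-- def swap(arr, i, j):
--     if not (0 <= i < len(arr)) or not (0 <= j < len(arr)):
--         raise IndexError
--
--     temp = arr[i]
--     arr[i] = arr[j]
--     arr[j] = temp
--
-- def quick_ops(arr):
--     operations = []
--
--     def partition_(arr, low, high):
--         i = low - 1
--         for j in range(low, high):
--             if arr[j] < arr[high]:
--                 i += 1
--                 operations.append(("s", i, j))
--                 swap(arr, i, j)
--         operations.append(("s", i + 1, high))
--         swap(arr, i + 1, high)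
--         return i + 1
--
--     def quick_sort_(arr, low, high):
--         if low < high:
--             pi = partition_(arr, low, high)
--
--             quick_sort_(arr, low, pi - 1)
--             quick_sort_(arr, pi + 1, high)
--
--     quick_sort_(arr, 0, len(arr) - 1)
--     return operations
-- ===== SOURCE B (Python) =====
-- def quick_ops(arr):
--     def partition(low, high):
--         ops = []
--         i = low - 1
--         j = low
--         while j < high:
--             if arr[j] < arr[high]:
--                 i += 1
--                 ops.append(("s", i, j))
--                 arr[i], arr[j] = arr[j], arr[i]
--             j += 1
--         ops.append(("s", i + 1, high))
--         arr[i + 1], arr[high] = arr[high], arr[i + 1]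
--         return ops, i + 1
--
--     trace = []
--     stack = [(0, len(arr) - 1)]
--     while stack:
--         low, high = stack.pop()
--         if low < high:
--             ops, pi = partition(low, high)
--             trace.extend(ops)
--             stack.append((pi + 1, high))
--             stack.append((low, pi - 1))
--     return trace
-- ===== Notes on version B (the rewrite author's own statement) =====
-- stated objective: alternative
-- what changed: The recursive quick_sort_ driver with a shared mutable operations list is replaced by an iterative explicit-stack loop over (low, high) ranges, and the partition helper is rewritten as a while loop with inline tuple-swap that returns its own local trace, which the driver concatenates onto the result.
import Mathlib
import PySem

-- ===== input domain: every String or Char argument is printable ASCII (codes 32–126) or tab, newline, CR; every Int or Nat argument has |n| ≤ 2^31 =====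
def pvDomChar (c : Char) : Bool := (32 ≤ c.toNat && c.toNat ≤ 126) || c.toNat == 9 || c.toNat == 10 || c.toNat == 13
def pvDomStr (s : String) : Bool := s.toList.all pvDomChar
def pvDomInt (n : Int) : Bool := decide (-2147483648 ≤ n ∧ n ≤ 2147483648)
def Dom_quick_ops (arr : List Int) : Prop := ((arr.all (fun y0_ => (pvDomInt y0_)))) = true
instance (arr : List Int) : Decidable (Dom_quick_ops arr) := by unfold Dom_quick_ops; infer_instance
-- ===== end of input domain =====

-- B replaces A's recursive driver (which mutates one shared operations list via a nested partition_
-- helper and A's guarded swap) by an explicit-stack loop whose while-loop partition returns a local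
-- trace, concatenated by the driver; objective: alternative decomposition, no speed claim. Both
-- Pythons sort `arr` in place as a side effect; the equivalence proved is about the RETURN value only.

-- ===== PORT A =====
-- swap(arr, i, j): out-of-range raises IndexError in Python; that branch is unreachable from
-- quick_ops (all indices produced by partition_ lie in range), so the port returns arr there.
def pvSwap (a : List Int) (i j : Int) : List Int :=
  if 0 ≤ i ∧ i < (a.length : Int) ∧ 0 ≤ j ∧ j < (a.length : Int) then
    (a.set i.toNat (a.getD j.toNat 0)).set j.toNat (a.getD i.toNat 0)
  else a

-- body of partition_'s `for j in range(low, high)` loop; state = (arr, operations, i)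
-- (indices j, high are always nonnegative and in range here, so getD after toNat is exact)
def partitionStep (high : Int) (st : List Int × List (String × Int × Int) × Int) (j : Int) :
    List Int × List (String × Int × Int) × Int :=
  match st with
  | (a, ops, i) =>
    if a.getD j.toNat 0 < a.getD high.toNat 0 then
      (pvSwap a (i + 1) j, ops ++ [("s", i + 1, j)], i + 1)
    else (a, ops, i)

-- partition_(arr, low, high): returns (arr, operations, pi)
def partition_ (a : List Int) (ops : List (String × Int × Int)) (low high : Int) :
    List Int × List (String × Int × Int) × Int :=
  let r := (PySem.List.pyRange low high 1).foldl (partitionStep high) (a, ops, low - 1)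
  (pvSwap r.1 (r.2.2 + 1) high, r.2.1 ++ [("s", r.2.2 + 1, high)], r.2.2 + 1)

-- quick_sort_(arr, low, high), recursion made structural with fuel; fuel arr.length always suffices
-- (each level removes the pivot from the interval), so the 0-fuel branch is unreachable.
def qsA : Nat → List Int → List (String × Int × Int) → Int → Int → List Int × List (String × Int × Int)
  | 0, a, ops, _, _ => (a, ops)
  | f + 1, a, ops, low, high =>
    if low < high then
      match partition_ a ops low high with
      | (a1, ops1, pi) =>
        match qsA f a1 ops1 low (pi - 1) with
        | (a2, ops2) => qsA f a2 ops2 (pi + 1) high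
    else (a, ops)

def quick_ops (arr : List Int) : List (String × Int × Int) :=
  (qsA arr.length arr [] 0 ((arr.length : Int) - 1)).2

-- ===== PORT B =====
-- `arr[i], arr[j] = arr[j], arr[i]`: RHS read first, then arr[i] and arr[j] assigned. Negative
-- indices would wrap in Python, but every index reached from quick_ops is in range, so toNat is exact.
def swapB (a : List Int) (i j : Int) : List Int :=
  (a.set i.toNat (a.getD j.toNat 0)).set j.toNat (a.getD i.toNat 0)

-- partition's `while j < high` loop plus the final swap after it; fuel = (high - j).toNat counts the
-- remaining iterations, so fuel 0 means j = high: loop exits and the two trailing statements run.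
-- Returns (arr, local ops list, pi).
def partB : Nat → List Int → Int → Int → Int → List Int × List (String × Int × Int) × Int
  | 0, a, i, _, high => (swapB a (i + 1) high, [("s", i + 1, high)], i + 1)
  | f + 1, a, i, j, high =>
    if a.getD j.toNat 0 < a.getD high.toNat 0 then
      match partB f (swapB a (i + 1) j) (i + 1) (j + 1) high with
      | (a', ops, pi) => (a', ("s", i + 1, j) :: ops, pi)
    else partB f a i (j + 1) high

-- the `while stack:` driver; head of the list = top of the stack; fuel bounds the number of
-- iterations (2*len+1 always suffices, so the 0-fuel branch is unreachable).
def qsB : Nat → List Int → List (String × Int × Int) → List (Int × Int) → List Int × List (String × Int × Int)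
  | _, a, tr, [] => (a, tr)
  | 0, a, tr, _ :: _ => (a, tr)
  | f + 1, a, tr, (low, high) :: rest =>
    if low < high then
      match partB (high - low).toNat a (low - 1) low high with
      | (a1, ops, pi) => qsB f a1 (tr ++ ops) ((low, pi - 1) :: (pi + 1, high) :: rest)
    else qsB f a tr rest

def quick_ops_alt (arr : List Int) : List (String × Int × Int) :=
  (qsB (2 * arr.length + 1) arr [] [(0, (arr.length : Int) - 1)]).2

-- ===== PRECONDITION & SPEC =====
def Spec_quick_ops (arr : List Int) (out : List (String × Int × Int)) : Prop := out = quick_ops_alt arr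
instance (arr : List Int) (out : List (String × Int × Int)) : Decidable (Spec_quick_ops arr out) := by unfold Spec_quick_ops; infer_instance

-- ===== CLAIM (what is proved, stated in full; the proofs are below) =====
def Claim_equal_quick_ops : Prop := ∀ (arr : List Int), Dom_quick_ops arr → Spec_quick_ops arr (quick_ops arr)

-- ===== LEMMAS AND PROOFS =====

lemma swapB_length (a : List Int) (i j : Int) : (swapB a i j).length = a.length := by
  simp [swapB]

lemma pvSwap_length (a : List Int) (i j : Int) : (pvSwap a i j).length = a.length := by
  unfold pvSwap; split <;> simp

lemma pvSwap_eq_swapB (a : List Int) (i j : Int)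
    (hi : 0 ≤ i) (hi' : i < (a.length : Int)) (hj : 0 ≤ j) (hj' : j < (a.length : Int)) :
    pvSwap a i j = swapB a i j := by
  unfold pvSwap swapB
  rw [if_pos ⟨hi, hi', hj, hj'⟩]

lemma partStep_i_bound (high : Int) :
    ∀ (js : List Int) (a : List Int) (ops : List (String × Int × Int)) (i0 : Int),
      i0 ≤ (js.foldl (partitionStep high) (a, ops, i0)).2.2 ∧
      (js.foldl (partitionStep high) (a, ops, i0)).2.2 ≤ i0 + js.length := by
  intro js
  induction js with
  | nil => intro a ops i0; simp
  | cons j js ih =>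
    intro a ops i0
    simp only [List.foldl_cons, partitionStep, List.length_cons]
    by_cases h : a.getD j.toNat 0 < a.getD high.toNat 0
    · simp only [if_pos h]
      have := ih (pvSwap a (i0 + 1) j) (ops ++ [("s", i0 + 1, j)]) (i0 + 1)
      push_cast
      omega
    · simp only [if_neg h]
      have := ih a ops i0
      push_cast
      omega

lemma partition_pi_bound (a : List Int) (ops : List (String × Int × Int)) (low high : Int)
    (h : low < high) :
    low ≤ (partition_ a ops low high).2.2 ∧ (partition_ a ops low high).2.2 ≤ high := by
  have hb := partStep_i_bound high (PySem.List.pyRange low high 1) a ops (low - 1)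
  rw [PySem.List.length_pyRange_one] at hb
  simp only [partition_]
  omega

lemma partStep_length (high : Int) :
    ∀ (js : List Int) (a : List Int) (ops : List (String × Int × Int)) (i0 : Int),
      ((js.foldl (partitionStep high) (a, ops, i0)).1).length = a.length := by
  intro js
  induction js with
  | nil => intro a ops i0; rfl
  | cons j js ih =>
    intro a ops i0
    simp only [List.foldl_cons, partitionStep]
    by_cases h : a.getD j.toNat 0 < a.getD high.toNat 0
    · simp only [if_pos h]
      rw [ih]; exact pvSwap_length a _ _
    · simp only [if_neg h]; exact ih a ops i0

lemma partition_length (a : List Int) (ops : List (String × Int × Int)) (low high : Int) :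
    ((partition_ a ops low high).1).length = a.length := by
  simp only [partition_]
  rw [pvSwap_length]
  exact partStep_length high _ a ops (low - 1)

-- full A-partition = ops-prefix normal form of partB, under in-range side conditions
lemma part_eq : ∀ (f : Nat) (a : List Int) (ops : List (String × Int × Int)) (i j high : Int),
    (high - j).toNat = f → 0 ≤ i + 1 → i + 1 ≤ j → j ≤ high → high < (a.length : Int) →
    (let r := (PySem.List.pyRange j high 1).foldl (partitionStep high) (a, ops, i)
     (pvSwap r.1 (r.2.2 + 1) high, r.2.1 ++ [("s", r.2.2 + 1, high)], r.2.2 + 1))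
      = (let p := partB f a i j high; (p.1, ops ++ p.2.1, p.2.2)) := by
  intro f
  induction f with
  | zero =>
    intro a ops i j high hf hi0 hij hjh hlen
    have hj : j = high := by omega
    subst hj
    have hr : PySem.List.pyRange j j 1 = [] := by simp [PySem.List.pyRange]
    simp only [hr, List.foldl_nil, partB]
    rw [pvSwap_eq_swapB a (i + 1) j hi0 (by omega) (by omega) hlen]
  | succ f ih =>
    intro a ops i j high hf hi0 hij hjh hlen
    have hjh' : j < high := by omega
    rw [PySem.List.pyRange_one_cons (by omega)]
    simp only [List.foldl_cons, partitionStep, partB]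
    by_cases hc : a.getD j.toNat 0 < a.getD high.toNat 0
    · simp only [if_pos hc]
      rw [pvSwap_eq_swapB a (i + 1) j hi0 (by omega) (by omega) (by omega)]
      have hlen' : high < ((swapB a (i + 1) j).length : Int) := by
        rw [swapB_length]; exact hlen
      have := ih (swapB a (i + 1) j) (ops ++ [("s", i + 1, j)]) (i + 1) (j + 1) high
        (by omega) (by omega) (by omega) (by omega) hlen'
      simp only at this ⊢
      rw [this]
      rcases partB f (swapB a (i + 1) j) (i + 1) (j + 1) high with ⟨a', ops', pi⟩
      simp
    · simp only [if_neg hc]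
      exact ih a ops i (j + 1) high (by omega) hi0 (by omega) (by omega) hlen

-- interval size, stack measure, stack invariant, and "run one range with A's recursion" (proof-only)
def pvSz (lo hi : Int) : Nat := (hi + 1 - lo).toNat

def pvM (st : List (Int × Int)) : Nat := (st.map (fun p => 2 * pvSz p.1 p.2 + 1)).sum

def pvInv (len : Nat) (st : List (Int × Int)) : Prop :=
  ∀ p ∈ st, 0 ≤ p.1 ∧ p.2 < (len : Int)

def pvStep (s : List Int × List (String × Int × Int)) (p : Int × Int) :
    List Int × List (String × Int × Int) :=
  qsA (pvSz p.1 p.2) s.1 s.2 p.1 p.2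

lemma qsA_of_not_lt {f : Nat} {a : List Int} {ops : List (String × Int × Int)} {lo hi : Int}
    (h : ¬ lo < hi) : qsA f a ops lo hi = (a, ops) := by
  cases f <;> simp [qsA, h]

lemma qsA_stable : ∀ (f1 f2 : Nat) (a : List Int) (ops : List (String × Int × Int)) (low high : Int),
    pvSz low high ≤ f1 → pvSz low high ≤ f2 → qsA f1 a ops low high = qsA f2 a ops low high := by
  intro f1
  induction f1 with
  | zero =>
    intro f2 a ops low high h1 _
    have hlh : ¬ low < high := by unfold pvSz at h1; omega
    rw [qsA_of_not_lt hlh, qsA_of_not_lt hlh]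
  | succ f ih =>
    intro f2 a ops low high h1 h2
    by_cases hlh : low < high
    · cases f2 with
      | zero => exfalso; unfold pvSz at h2; omega
      | succ g =>
        simp only [qsA, if_pos hlh]
        rcases hp : partition_ a ops low high with ⟨a1, ops1, pi⟩
        have hb := partition_pi_bound a ops low high hlh
        rw [hp] at hb
        simp only at hb
        have e1 : qsA f a1 ops1 low (pi - 1) = qsA g a1 ops1 low (pi - 1) :=
          ih g a1 ops1 low (pi - 1) (by unfold pvSz at *; omega) (by unfold pvSz at *; omega)
        rw [e1]
        rcases qsA g a1 ops1 low (pi - 1) with ⟨a2, ops2⟩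
        exact ih g a2 ops2 (pi + 1) high (by unfold pvSz at *; omega) (by unfold pvSz at *; omega)
    · rw [qsA_of_not_lt hlh, qsA_of_not_lt hlh]

lemma qsB_sim : ∀ (f : Nat) (stack : List (Int × Int)) (a : List Int)
    (tr : List (String × Int × Int)),
    pvM stack ≤ f → pvInv a.length stack → qsB f a tr stack = stack.foldl pvStep (a, tr) := by
  intro f
  induction f with
  | zero =>
    intro stack a tr h _
    cases stack with
    | nil => rfl
    | cons p rest => exfalso; simp [pvM] at h
  | succ f ih =>
    intro stack a tr h hinv
    cases stack with
    | nil => rfl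
    | cons p rest =>
      rcases p with ⟨low, high⟩
      have hinv0 := hinv (low, high) (by simp)
      simp only at hinv0
      by_cases hlh : low < high
      · simp only [qsB, if_pos hlh]
        -- convert B's partition to A's partition_
        have hpe := part_eq (high - low).toNat a tr (low - 1) low high rfl
          (by omega) (by omega) (by omega) hinv0.2
        simp only at hpe
        rcases hB : partB (high - low).toNat a (low - 1) low high with ⟨a1, ops1, pi⟩
        rw [hB] at hpe
        have hApart : partition_ a tr low high = (a1, tr ++ ops1, pi) := by
          simpa [partition_] using hpe
        have hb := partition_pi_bound a tr low high hlh
        rw [hApart] at hb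
        simp only at hb
        have hlen1 : a1.length = a.length := by
          have := partition_length a tr low high
          rw [hApart] at this
          exact this
        have hM : pvM ((low, pi - 1) :: (pi + 1, high) :: rest) ≤ f := by
          simp only [pvM, List.map_cons, List.sum_cons] at h ⊢
          unfold pvSz at h ⊢
          omega
        have hinv' : pvInv a1.length ((low, pi - 1) :: (pi + 1, high) :: rest) := by
          intro q hq
          rw [hlen1]
          simp only [List.mem_cons] at hq
          rcases hq with rfl | rfl | h1
          · exact ⟨hinv0.1, by omega⟩
          · exact ⟨by omega, hinv0.2⟩
          · exact hinv q (by simp [h1])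
        rw [ih _ _ _ hM hinv']
        simp only [List.foldl_cons]
        have key : pvStep (pvStep (a1, tr ++ ops1) (low, pi - 1)) (pi + 1, high)
            = pvStep (a, tr) (low, high) := by
          obtain ⟨t, ht⟩ : ∃ t, pvSz low high = t + 1 :=
            ⟨pvSz low high - 1, by unfold pvSz; omega⟩
          simp only [pvStep, ht, qsA, if_pos hlh, hApart]
          have e1 : qsA t a1 (tr ++ ops1) low (pi - 1)
              = qsA (pvSz low (pi - 1)) a1 (tr ++ ops1) low (pi - 1) :=
            qsA_stable t (pvSz low (pi - 1)) a1 (tr ++ ops1) low (pi - 1)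
              (by unfold pvSz at *; omega) (le_refl _)
          rw [e1]
          rcases qsA (pvSz low (pi - 1)) a1 (tr ++ ops1) low (pi - 1) with ⟨a2, ops2⟩
          exact qsA_stable (pvSz (pi + 1) high) t a2 ops2 (pi + 1) high (le_refl _)
            (by unfold pvSz at *; omega)
        rw [key]
      · simp only [qsB, if_neg hlh]
        rw [ih rest a tr (by simp only [pvM, List.map_cons, List.sum_cons] at h ⊢; omega)
          (fun q hq => hinv q (by simp [hq]))]
        simp only [List.foldl_cons]
        have : pvStep (a, tr) (low, high) = (a, tr) := by
          simp [pvStep, qsA_of_not_lt hlh]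
        rw [this]

-- ===== VERDICT (by name: the statement is the Claim_ definition above) =====
theorem quick_ops_spec : Claim_equal_quick_ops := by
  intro arr _
  show quick_ops arr = quick_ops_alt arr
  unfold quick_ops quick_ops_alt
  have hsz : pvSz 0 ((arr.length : Int) - 1) = arr.length := by unfold pvSz; omega
  rw [qsB_sim (2 * arr.length + 1) _ arr []
    (by simp only [pvM, List.map_cons, List.map_nil, List.sum_cons, List.sum_nil, hsz]; omega)
    (by intro p hp; simp only [List.mem_singleton] at hp; subst hp; exact ⟨le_refl 0, by omega⟩)]
  simp [pvStep, hsz]
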